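-- pv_equiv track=rewrite | github.com/MatthijsPrinsen/Information-Security | Assignment 1/ex5.py | get_key_length
-- ===== SOURCE A (Python) =====
-- def get_key_length(key_len:int, string:str):
--     """
--     Taking in the current key length, to find the frequency for each letter at the key length.
--     Return it to be printed.
--     For loop for all possible key lengths.
--
--
--     Tested and working correctly.
--     """
--     text = [i.lower() for i in string if i.isalpha()]
--     groups = [[0]*26 for _ in range(key_len)]
--
--     pos = 0
--     for i in text:
--         group = pos % key_len
--         groups[group][ord(i)-ord('a')] += 1
--         pos += 1
--
--     return groups
-- ===== SOURCE B (Python) =====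
-- def get_key_length(key_len: int, string: str):
--     text = [c.lower() for c in string if c.isalpha()]
--     result = []
--     for g in range(key_len):
--         counts = [0] * 26
--         for c in text[g::key_len]:
--             counts[ord(c) - ord('a')] += 1
--         result.append(counts)
--     return result
-- ===== Notes on version B (the rewrite author's own statement) =====
-- stated objective: alternative
-- what changed: B counts each key column separately from its stride slice text[g::key_len] (one fresh 26-counter per column), instead of A's single interleaved pass that dispatches every letter by pos % key_len into a preallocated table.
import Mathlib
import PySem

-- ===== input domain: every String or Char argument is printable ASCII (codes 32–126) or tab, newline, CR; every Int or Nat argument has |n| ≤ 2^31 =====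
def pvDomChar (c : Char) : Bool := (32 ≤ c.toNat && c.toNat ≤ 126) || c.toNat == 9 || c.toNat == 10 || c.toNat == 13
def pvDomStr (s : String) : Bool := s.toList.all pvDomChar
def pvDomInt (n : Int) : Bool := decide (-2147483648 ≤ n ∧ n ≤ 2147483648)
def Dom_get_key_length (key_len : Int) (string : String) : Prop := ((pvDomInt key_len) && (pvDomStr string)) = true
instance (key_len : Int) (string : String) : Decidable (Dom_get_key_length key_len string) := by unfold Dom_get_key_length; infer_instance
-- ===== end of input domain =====

-- B counts each key column separately from its stride slice text[g::key_len] instead of A's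
-- single interleaved pos % key_len pass (alternative decomposition, same cost).


-- ===== PORT A =====
-- shared by both ports (both Pythons contain the identical line):
-- text = [c.lower() for c in string if c.isalpha()]
def pvText (string : String) : List Char :=
  (string.toList.filter PySem.Chars.isalpha).map PySem.Chars.lowerChar

-- counts[ord(c) - ord('a')] += 1  (exact here: every c reaching it is lowercase ASCII, so ord c ≥ ord 'a')
def pvInc (row : List Int) (c : Char) : List Int :=
  row.set (c.toNat - 'a'.toNat) (row.getD (c.toNat - 'a'.toNat) 0 + 1)

def get_key_length (key_len : Int) (string : String) : List (List Int) :=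
  let text := pvText string
  let groups := (PySem.List.pyRange 0 key_len).map (fun _ => List.replicate 26 (0 : Int))
  (text.foldl
    (fun (st : List (List Int) × Int) c =>
      let group := (PySem.Int.mod st.2 key_len).toNat
      (st.1.set group (pvInc (st.1.getD group []) c), st.2 + 1))
    (groups, 0)).1

-- ===== PORT B =====
-- hand port of the stride slice text[g::key_len], exact for 0 ≤ g and step key_len ≥ 1 —
-- the only values the range loop produces: take an element, skip key_len - 1, repeat
def pvEveryK (k : Nat) : List Char → List Char
  | [] => []
  | c :: t => c :: pvEveryK k (t.drop (k - 1))
termination_by t => t.length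
decreasing_by simp [List.length_drop]

def get_key_length_alt (key_len : Int) (string : String) : List (List Int) :=
  let text := pvText string
  (PySem.List.pyRange 0 key_len).foldl
    (fun res g =>
      res ++ [(pvEveryK key_len.toNat (text.drop g.toNat)).foldl pvInc (List.replicate 26 (0 : Int))])
    []

-- ===== PRECONDITION & SPEC =====
-- Pre_ excludes exactly the inputs where A raises: key_len ≤ 0 together with at least one
-- alphabetic character (ZeroDivisionError at key_len = 0, IndexError for negative key_len);
-- B naturally returns [] there.
def Pre_get_key_length (key_len : Int) (string : String) : Prop :=
  1 ≤ key_len ∨ ∀ c ∈ string.toList, PySem.Chars.isalpha c = false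
instance (key_len : Int) (string : String) : Decidable (Pre_get_key_length key_len string) := by unfold Pre_get_key_length; infer_instance

def pvWitness_get_key_length : Int × String := (3, "Attack at dawn!")

def Spec_get_key_length (key_len : Int) (string : String) (out : List (List Int)) : Prop := out = get_key_length_alt key_len string
instance (key_len : Int) (string : String) (out : List (List Int)) : Decidable (Spec_get_key_length key_len string out) := by unfold Spec_get_key_length; infer_instance

-- ===== CLAIM (what is proved, stated in full; the proofs are below) =====
def Claim_equal_get_key_length : Prop := ∀ (key_len : Int) (string : String), Dom_get_key_length key_len string → Pre_get_key_length key_len string → Spec_get_key_length key_len string (get_key_length key_len string)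
-- ===== LEMMAS AND PROOFS =====

-- proof-only helper: the elements of t at stride K, starting after j initial skips
def pvPick (K : Nat) : Nat → List Char → List Char
  | _, [] => []
  | 0, c :: t => c :: pvPick K (K - 1) t
  | j + 1, _ :: t => pvPick K j t
termination_by _ t => t.length

lemma pvSuccMod (p K : Nat) : (p + 1) % K = (p % K + 1) % K := by
  rw [Nat.add_mod, Nat.add_mod (p % K) 1, Nat.mod_mod]

lemma pvPick_everyK (K : Nat) (hK : 0 < K) :
    ∀ (t : List Char) (j : Nat), j < K → pvPick K j t = pvEveryK K (t.drop j) := by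
  intro t
  induction t with
  | nil => intro j _; cases j <;> simp [pvPick, pvEveryK]
  | cons c t ih =>
    intro j hj
    cases j with
    | zero => simpa [pvPick, pvEveryK] using ih (K - 1) (by omega)
    | succ j => simpa [pvPick] using ih j (by omega)

-- A's loop step, named for the proofs (defeq to the lambda inside get_key_length)
def pvStep (key_len : Int) (st : List (List Int) × Int) (c : Char) : List (List Int) × Int :=
  let group := (PySem.Int.mod st.2 key_len).toNat
  (st.1.set group (pvInc (st.1.getD group []) c), st.2 + 1)

lemma pvModSmall (x K : Nat) (hx : x < 2 * K) :
    x % K = if x < K then x else x - K := by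
  by_cases h : x < K
  · rw [if_pos h, Nat.mod_eq_of_lt h]
  · rw [if_neg h, Nat.mod_eq_sub_mod (by omega), Nat.mod_eq_of_lt (by omega)]

lemma pvJ_zero_iff (K g m : Nat) (hK : 0 < K) (hg : g < K) (hm : m < K) :
    (g + K - m) % K = 0 ↔ m = g := by
  rw [pvModSmall (g + K - m) K (by omega)]
  split_ifs <;> omega

-- the skip counter (g + K - p % K) % K decreases by 1 each step, resetting to K - 1 on a hit
lemma pvJ_step (K g m : Nat) (hK : 0 < K) (hg : g < K) (hm : m < K) :
    (g + K - (m + 1) % K) % K = if m = g then K - 1 else (g + K - m) % K - 1 := by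
  by_cases h1 : m + 1 = K
  · have e0 : (m + 1) % K = 0 := by rw [h1, Nat.mod_self]
    rw [e0, Nat.sub_zero, pvModSmall (g + K) K (by omega), pvModSmall (g + K - m) K (by omega)]
    split_ifs <;> omega
  · have e0 : (m + 1) % K = m + 1 := Nat.mod_eq_of_lt (by omega)
    rw [e0, pvModSmall (g + K - (m + 1)) K (by omega), pvModSmall (g + K - m) K (by omega)]
    split_ifs <;> omega

lemma pvLoop_len (k : Int) :
    ∀ (t : List Char) (gs : List (List Int)) (p : Int),
      ((t.foldl (pvStep k) (gs, p)).1).length = gs.length := by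
  intro t
  induction t with
  | nil => intro gs p; rfl
  | cons c t ih =>
    intro gs p
    rw [List.foldl_cons]
    exact (ih _ _).trans (by simp)

-- loop invariant: column g of A's fold collects exactly the pvPick-selected letters
lemma pvLoop (K : Nat) (hK : 0 < K) :
    ∀ (t : List Char) (gs : List (List Int)) (p : Nat) (g : Nat), g < K →
      ((t.foldl (pvStep (K : Int)) (gs, (p : Int))).1)[g]? =
        (gs[g]?).map (fun row => (pvPick K ((g + K - p % K) % K) t).foldl pvInc row) := by
  intro t
  induction t with
  | nil => intro gs p g hg; simp [pvPick]
  | cons c t ih =>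
    intro gs p g hg
    have hlt : p % K < K := Nat.mod_lt _ hK
    have hstep : pvStep (K : Int) (gs, (p : Int)) c
        = (gs.set (p % K) (pvInc (gs.getD (p % K) []) c), ((p + 1 : Nat) : Int)) := by
      simp only [pvStep, PySem.Int.mod_natCast, Int.toNat_natCast, Nat.cast_add,
        Nat.cast_one]
    rw [List.foldl_cons, hstep, ih _ (p + 1) g hg]
    by_cases hmg : p % K = g
    · have hj : (g + K - p % K) % K = 0 := (pvJ_zero_iff K g (p % K) hK hg hlt).mpr hmg
      have hj' : (g + K - (p + 1) % K) % K = K - 1 := by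
        rw [pvSuccMod, pvJ_step K g (p % K) hK hg hlt, if_pos hmg]
      rw [hj, hj', hmg]
      by_cases hlen : g < gs.length
      · rw [List.getElem?_set_self hlen, List.getElem?_eq_getElem hlen]
        simp [pvPick, List.getD, List.getElem?_eq_getElem hlen]
      · have h1 : (gs.set g (pvInc (gs.getD g []) c))[g]? = none := by
          rw [List.getElem?_eq_none_iff, List.length_set]; omega
        rw [h1, List.getElem?_eq_none (by omega)]
        simp
    · have hjne : (g + K - p % K) % K ≠ 0 :=
        fun h => hmg ((pvJ_zero_iff K g (p % K) hK hg hlt).mp h)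
      have hj' : (g + K - (p + 1) % K) % K = (g + K - p % K) % K - 1 := by
        rw [pvSuccMod, pvJ_step K g (p % K) hK hg hlt, if_neg hmg]
      rw [List.getElem?_set_ne hmg, hj']
      rcases Nat.exists_eq_succ_of_ne_zero hjne with ⟨j', hj2⟩
      rw [hj2]
      simp [pvPick]

lemma pvText_nil (s : String) (h : ∀ c ∈ s.toList, PySem.Chars.isalpha c = false) :
    pvText s = [] := by
  unfold pvText
  rw [List.filter_eq_nil_iff.mpr (by intro c hc; simp [h c hc])]
  rfl

lemma pvRange_nonpos (k : Int) (hk : k ≤ 0) : PySem.List.pyRange 0 k = [] := by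
  unfold PySem.List.pyRange
  rw [if_neg (by norm_num)]
  simp only [show ¬((0:Int) < k) from by omega, if_false, if_pos (by norm_num : (0:Int) < 1)]
  rfl

-- unfolding the two ports to the named pieces (defeq)
lemma pvA_eq (k : Int) (s : String) :
    get_key_length k s =
      ((pvText s).foldl (pvStep k)
        (((PySem.List.pyRange 0 k).map (fun _ => List.replicate 26 (0 : Int))), 0)).1 := rfl

lemma pvB_eq (k : Int) (s : String) :
    get_key_length_alt k s =
      (PySem.List.pyRange 0 k).foldl
        (fun res g =>
          res ++ [(pvEveryK k.toNat ((pvText s).drop g.toNat)).foldl pvInc (List.replicate 26 (0 : Int))])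
        [] := rfl

-- ===== VERDICT (by name: the statement is the Claim_ definition above) =====
theorem get_key_length_spec : Claim_equal_get_key_length := by
  intro k s _ hpre
  unfold Spec_get_key_length
  by_cases hk : 1 ≤ k
  · -- k ≥ 1: the real case
    have hkK : k = ((k.toNat : Nat) : Int) := (Int.toNat_of_nonneg (by omega)).symm
    set K := k.toNat with hKdef
    have hK : 0 < K := by omega
    rw [pvA_eq, pvB_eq, hkK, PySem.List.pyRange_zero_natCast,
        PySem.List.foldl_append_singleton_eq_map, List.nil_append]
    have hgroups : ((List.range K).map (fun n : Nat => (n : Int))).map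
        (fun _ => List.replicate 26 (0 : Int)) = List.replicate K (List.replicate 26 (0 : Int)) := by
      rw [List.map_map,
        show ((fun _ => List.replicate 26 (0 : Int)) ∘ (fun n : Nat => (n : Int)))
          = (fun _ : Nat => List.replicate 26 (0 : Int)) from rfl,
        List.map_const', List.length_range]
    rw [hgroups]
    apply List.ext_getElem?
    intro g
    by_cases hg : g < K
    · rw [show ((0 : Int)) = ((0 : Nat) : Int) from rfl, pvLoop K hK _ _ 0 g hg]
      have hj0 : (g + K - 0 % K) % K = g := by
        rw [Nat.zero_mod, Nat.sub_zero, Nat.add_mod_right, Nat.mod_eq_of_lt hg]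
      rw [hj0, List.getElem?_map, List.getElem?_map, List.getElem?_range hg]
      simp [hg, pvPick_everyK K hK _ g hg]
    · have hlenA : (((pvText s).foldl (pvStep ((K : Nat) : Int))
          (List.replicate K (List.replicate 26 (0 : Int)), (0 : Int))).1).length = K := by
        rw [pvLoop_len]; simp
      rw [List.getElem?_eq_none (by rw [hlenA]; omega),
          List.getElem?_eq_none (by simp; omega)]
  · -- k ≤ 0: Pre_ forces an all-non-alphabetic string, both sides are []
    have hall : ∀ c ∈ s.toList, PySem.Chars.isalpha c = false := by
      rcases hpre with h | h
      · omega
      · exact h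
    rw [pvA_eq, pvB_eq, pvText_nil s hall, pvRange_nonpos k (by omega)]
    rfl
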